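-- pv_equiv track=rewrite | github.com/MrBrantCode/unitest_baseline | mut_generate/mist_train_taco/taco_16839/solution.py | validate_and_split_file_names
-- ===== SOURCE A (Python) =====
-- def validate_and_split_file_names(s: str) -> tuple:
--     n = len(s)
--     a = s.find('.')
--     b = s.rfind('.')
--
--     if a == b == -1:
--         return (False, None)
--
--     if a == 0 or n - b - 1 == 0:
--         return (False, None)
--
--     if not 0 < a < 9 or not 0 < n - b - 1 < 4:
--         return (False, None)
--
--     s2 = s[a + 1:b + 1]
--     res = [s[:a + 1]]
--     app = res.append
--     (length, item) = (0, '')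
--
--     for (i, x) in enumerate(s2):
--         if x == '.':
--             if not 1 < length < 12:
--                 return (False, None)
--             k = 0
--             if length == 11:
--                 res[-1] += item[:3]
--                 k = 3
--             elif length == 10:
--                 res[-1] += item[:2]
--                 k = 2
--             else:
--                 res[-1] += item[0]
--                 k = 1
--             app(item[k:] + '.')
--             (length, item) = (0, '')
--         else:
--             length += 1
--             item += x
--
--     res[-1] += s[b + 1:]
--     return (True, res)
-- ===== SOURCE B (Python) =====
-- def validate_and_split_file_names(s: str) -> tuple:
--     n = len(s)
--     a = s.find('.')
--     b = s.rfind('.')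
--
--     if not (0 < a < 9 and 0 < n - b - 1 < 4):
--         return (False, None)
--
--     # middle tokens, each the text between consecutive dots (trailing '' dropped)
--     parts = s[a + 1:b + 1].split('.')[:-1]
--
--     if any(not 1 < len(t) < 12 for t in parts):
--         return (False, None)
--
--     res = [s[:a + 1]]
--     for t in parts:
--         k = 3 if len(t) == 11 else 2 if len(t) == 10 else 1
--         res[-1] += t[:k]
--         res.append(t[k:] + '.')
--     res[-1] += s[b + 1:]
--     return (True, res)
-- ===== Notes on version B (the rewrite author's own statement) =====
-- stated objective: simpler
-- what changed: B collapses A's three guard cascades into one combined check, tokenizes the middle section with str.split on the dot separator and validates all token lengths up front with any(), then builds the result in a plain loop over whole tokens instead of A's character-by-character state machine with an accumulated item/length and early returns inside the scan.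
import Mathlib
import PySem

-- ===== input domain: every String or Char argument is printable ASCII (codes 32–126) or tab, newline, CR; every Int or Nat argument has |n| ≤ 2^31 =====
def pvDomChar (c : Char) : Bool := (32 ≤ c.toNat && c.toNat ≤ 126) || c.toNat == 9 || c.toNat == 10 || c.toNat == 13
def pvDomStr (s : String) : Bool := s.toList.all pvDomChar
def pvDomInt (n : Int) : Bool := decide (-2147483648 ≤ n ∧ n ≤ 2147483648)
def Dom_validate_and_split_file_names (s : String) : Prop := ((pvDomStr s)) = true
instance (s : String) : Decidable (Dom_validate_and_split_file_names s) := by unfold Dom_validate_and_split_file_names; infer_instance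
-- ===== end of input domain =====

-- B replaces A's character-by-character state machine (and its three guard cascades) by one
-- combined guard, a str.split tokenization with up-front validation, and a loop over whole
-- tokens; objective: simpler, same O(n) cost.

-- ===== PORT A =====
-- A's for-loop over s2: state = (done parts, latest part, length, item); the Python list `res`
-- is (cur :: done).reverse (`res[-1] += x` edits cur, `app(t)` pushes cur into done).
def pvLoopA : List Char → List (List Char) → List Char → Nat → List Char → Option (List (List Char) × List Char)
  | [], done, cur, _len, _item => some (done, cur)
  | x :: rest, done, cur, len, item =>
    if x = '.' then
      if ¬ (1 < len ∧ len < 12) then none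
      else if len = 11 then pvLoopA rest ((cur ++ item.take 3) :: done) (item.drop 3 ++ ['.']) 0 []
      else if len = 10 then pvLoopA rest ((cur ++ item.take 2) :: done) (item.drop 2 ++ ['.']) 0 []
      else pvLoopA rest ((cur ++ item.take 1) :: done) (item.drop 1 ++ ['.']) 0 []
    else pvLoopA rest done cur (len + 1) (item ++ [x])

def validate_and_split_file_names (s : String) : Bool × Option (List String) :=
  let cs := s.toList
  let n : Int := cs.length
  let a := PySem.Chars.find cs ['.']
  let b := PySem.Chars.rfind cs ['.']
  if a = b ∧ b = -1 then (false, none)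
  else if a = 0 ∨ n - b - 1 = 0 then (false, none)
  else if ¬ (0 < a ∧ a < 9) ∨ ¬ (0 < n - b - 1 ∧ n - b - 1 < 4) then (false, none)
  else
    let s2 := PySem.List.slice cs (some (a + 1)) (some (b + 1))
    match pvLoopA s2 [] (PySem.List.slice cs none (some (a + 1))) 0 [] with
    | none => (false, none)
    | some (done, cur) =>
      (true, some (((cur ++ PySem.List.slice cs (some (b + 1)) none) :: done).reverse.map String.ofList))

-- ===== PORT B =====
-- B's construction loop body (t[:k] / t[k:] with k ∈ {1,2,3} are exactly take k / drop k);
-- result list represented as in port A: (cur :: done).reverse.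
def pvStepB (st : List (List Char) × List Char) (t : List Char) : List (List Char) × List Char :=
  let k := if t.length = 11 then 3 else if t.length = 10 then 2 else 1
  ((st.2 ++ t.take k) :: st.1, t.drop k ++ ['.'])

def validate_and_split_file_names_alt (s : String) : Bool × Option (List String) :=
  let cs := s.toList
  let n : Int := cs.length
  let a := PySem.Chars.find cs ['.']
  let b := PySem.Chars.rfind cs ['.']
  if ¬ ((0 < a ∧ a < 9) ∧ (0 < n - b - 1 ∧ n - b - 1 < 4)) then (false, none)
  else
    let parts := PySem.List.slice
      (PySem.Chars.splitOn (PySem.List.slice cs (some (a + 1)) (some (b + 1))) ['.'])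
      none (some (-1))
    if parts.any (fun t => !(decide (1 < t.length ∧ t.length < 12))) then (false, none)
    else
      let st := parts.foldl pvStepB ([], PySem.List.slice cs none (some (a + 1)))
      (true, some (((st.2 ++ PySem.List.slice cs (some (b + 1)) none) :: st.1).reverse.map String.ofList))

-- ===== PRECONDITION & SPEC =====
def Spec_validate_and_split_file_names (s : String) (out : Bool × Option (List String)) : Prop := out = validate_and_split_file_names_alt s
instance (s : String) (out : Bool × Option (List String)) : Decidable (Spec_validate_and_split_file_names s out) := by unfold Spec_validate_and_split_file_names; infer_instance

-- ===== CLAIM (what is proved, stated in full; the proofs are below) =====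
def Claim_equal_validate_and_split_file_names : Prop := ∀ (s : String), Dom_validate_and_split_file_names s → Spec_validate_and_split_file_names s (validate_and_split_file_names s)

-- ===== LEMMAS AND PROOFS =====

-- prepend p onto the first piece ([] gets the single piece [p])
def pvConsFirst (p : List Char) : List (List Char) → List (List Char)
  | [] => [p]
  | x :: xs => (p ++ x) :: xs

-- structural form of split-on-'.'
def pvSplit : List Char → List (List Char)
  | [] => [[]]
  | c :: rest => if c = '.' then [] :: pvSplit rest else pvConsFirst [c] (pvSplit rest)

-- validate-and-build over a token list (what A's loop computes per completed token)
def pvLoopB : List (List Char) → List (List Char) → List Char → Option (List (List Char) × List Char)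
  | [], done, cur => some (done, cur)
  | t :: ts, done, cur =>
    if ¬ (1 < t.length ∧ t.length < 12) then none
    else pvLoopB ts
      ((cur ++ t.take (if t.length = 11 then 3 else if t.length = 10 then 2 else 1)) :: done)
      (t.drop (if t.length = 11 then 3 else if t.length = 10 then 2 else 1) ++ ['.'])

theorem pvSplit_ne_nil (cs : List Char) : pvSplit cs ≠ [] := by
  cases cs with
  | nil => simp [pvSplit]
  | cons c rest =>
    simp only [pvSplit]
    split
    · simp
    · cases h : pvSplit rest <;> simp [pvConsFirst]

theorem pvConsFirst_append (p q : List Char) (xs : List (List Char)) :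
    pvConsFirst (p ++ q) xs = pvConsFirst p (pvConsFirst q xs) := by
  cases xs <;> simp [pvConsFirst]

theorem pvConsFirst_nil (xs : List (List Char)) (h : xs ≠ []) : pvConsFirst [] xs = xs := by
  cases xs <;> simp_all [pvConsFirst]

theorem pvGo_eq (l : List Char) (fuel : Nat) (cur : List Char) (acc : List (List Char))
    (h : l.length ≤ fuel) :
    PySem.Chars.splitOn.go ['.'] fuel l cur acc = acc.reverse ++ pvConsFirst cur.reverse (pvSplit l) := by
  induction l generalizing fuel cur acc with
  | nil =>
    cases fuel <;> simp [PySem.Chars.splitOn.go, pvSplit, pvConsFirst]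
  | cons c rest ih =>
    cases fuel with
    | zero => simp at h
    | succ f =>
      rw [PySem.Chars.splitOn.go]
      by_cases hc : c = '.'
      · subst hc
        have hp : List.isPrefixOf ['.'] ('.' :: rest) = true := by simp [List.isPrefixOf]
        simp only [hp, if_pos]
        have hdrop : List.drop (['.'] : List Char).length ('.' :: rest) = rest := rfl
        rw [hdrop]
        rw [ih f [] (cur.reverse :: acc) (by simpa using Nat.le_of_succ_le_succ h)]
        simp only [List.reverse_nil]
        rw [pvConsFirst_nil _ (pvSplit_ne_nil rest)]
        simp [pvSplit, pvConsFirst]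
      · have hp : List.isPrefixOf ['.'] (c :: rest) = false := by
          simp [List.isPrefixOf]; exact fun h' => (hc h'.symm).elim
        simp only [hp, Bool.false_eq_true, if_neg, not_false_iff]
        rw [ih f (c :: cur) acc (by simpa using Nat.le_of_succ_le_succ h)]
        simp only [List.reverse_cons]
        rw [pvConsFirst_append]
        simp [pvSplit, hc]

theorem pvSplitOn_eq (cs : List Char) : PySem.Chars.splitOn cs ['.'] = pvSplit cs := by
  unfold PySem.Chars.splitOn
  rw [pvGo_eq cs (cs.length + 1) [] [] (by omega)]
  simp [pvConsFirst_nil _ (pvSplit_ne_nil cs)]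

theorem pvLoopA_eq (cs : List Char) : ∀ (done : List (List Char)) (cur item : List Char),
    pvLoopA cs done cur item.length item = pvLoopB ((pvConsFirst item (pvSplit cs)).dropLast) done cur := by
  induction cs with
  | nil => intro done cur item; simp [pvLoopA, pvLoopB, pvSplit, pvConsFirst]
  | cons c rest ih =>
    intro done cur item
    by_cases hc : c = '.'
    · subst hc
      have hsplit : pvSplit ('.' :: rest) = [] :: pvSplit rest := by simp [pvSplit]
      rw [hsplit]
      have hcf : pvConsFirst item ([] :: pvSplit rest) = item :: pvSplit rest := by
        simp [pvConsFirst]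
      rw [hcf, List.dropLast_cons_of_ne_nil (pvSplit_ne_nil rest)]
      show pvLoopA ('.' :: rest) done cur item.length item = pvLoopB (item :: (pvSplit rest).dropLast) done cur
      rw [pvLoopA, pvLoopB]
      simp only [if_true]
      by_cases hbad : ¬ (1 < item.length ∧ item.length < 12)
      · rw [if_pos hbad, if_pos hbad]
      · rw [if_neg hbad, if_neg hbad]
        have key : ∀ d' c', pvLoopA rest d' c' 0 [] = pvLoopB ((pvSplit rest).dropLast) d' c' := by
          intro d' c'
          have := ih d' c' []
          rwa [List.length_nil, pvConsFirst_nil _ (pvSplit_ne_nil rest)] at this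
        by_cases h11 : item.length = 11
        · rw [if_pos h11, key]; simp [h11]
        · rw [if_neg h11]
          by_cases h10 : item.length = 10
          · rw [if_pos h10, key]; simp [h10]
          · rw [if_neg h10, key]; simp [h10, h11]

    · have hsplit : pvSplit (c :: rest) = pvConsFirst [c] (pvSplit rest) := by
        simp [pvSplit, hc]
      rw [hsplit, ← pvConsFirst_append]
      have : pvLoopA (c :: rest) done cur item.length item
           = pvLoopA rest done cur (item.length + 1) (item ++ [c]) := by
        rw [pvLoopA]; simp [hc]
      rw [this]
      have hlen : item.length + 1 = (item ++ [c]).length := by simp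
      rw [hlen, ih done cur (item ++ [c])]

theorem pvLoopB_run (ts : List (List Char)) : ∀ (done : List (List Char)) (cur : List Char),
    pvLoopB ts done cur =
      if ts.any (fun t => !(decide (1 < t.length ∧ t.length < 12))) then none
      else some (ts.foldl pvStepB (done, cur)) := by
  induction ts with
  | nil => intro done cur; simp [pvLoopB]
  | cons t ts ih =>
    intro done cur
    rw [pvLoopB]
    by_cases hbad : 1 < t.length ∧ t.length < 12
    · rw [if_neg (not_not_intro hbad), ih]
      have : (t :: ts).any (fun t => !(decide (1 < t.length ∧ t.length < 12)))
           = ts.any (fun t => !(decide (1 < t.length ∧ t.length < 12))) := by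
        simp [List.any_cons, hbad]
      rw [this]
      simp [pvStepB, List.foldl_cons]
    · rw [if_pos hbad]
      have : (t :: ts).any (fun t => !(decide (1 < t.length ∧ t.length < 12))) = true := by
        simp only [List.any_cons]
        simp; left; omega
      rw [this]; simp

-- ===== VERDICT (by name: the statement is the Claim_ definition above) =====
theorem validate_and_split_file_names_spec : Claim_equal_validate_and_split_file_names := by
  intro s _
  unfold Spec_validate_and_split_file_names
  unfold validate_and_split_file_names validate_and_split_file_names_alt
  dsimp only
  set cs := s.toList with hcs
  set n : Int := (cs.length : Int) with hn
  set a := PySem.Chars.find cs ['.'] with ha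
  set b := PySem.Chars.rfind cs ['.'] with hb
  by_cases hG : ¬ ((0 < a ∧ a < 9) ∧ (0 < n - b - 1 ∧ n - b - 1 < 4))
  · rw [if_pos hG]
    by_cases h1 : a = b ∧ b = -1
    · rw [if_pos h1]
    · rw [if_neg h1]
      by_cases h2 : a = 0 ∨ n - b - 1 = 0
      · rw [if_pos h2]
      · rw [if_neg h2]
        have h3 : ¬ (0 < a ∧ a < 9) ∨ ¬ (0 < n - b - 1 ∧ n - b - 1 < 4) := by tauto
        rw [if_pos h3]
  · rw [if_neg hG]
    obtain ⟨⟨ha1, ha2⟩, hb1, hb2⟩ := not_not.mp hG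
    rw [if_neg (by omega : ¬ (a = b ∧ b = -1))]
    rw [if_neg (by omega : ¬ (a = 0 ∨ n - b - 1 = 0))]
    have h3 : ¬ (¬ (0 < a ∧ a < 9) ∨ ¬ (0 < n - b - 1 ∧ n - b - 1 < 4)) := by tauto
    rw [if_neg h3]
    set s2 := PySem.List.slice cs (some (a + 1)) (some (b + 1)) with hs2
    set pre := PySem.List.slice cs none (some (a + 1)) with hpre
    have hA : pvLoopA s2 [] pre 0 [] = pvLoopB ((pvSplit s2).dropLast) [] pre := by
      have := pvLoopA_eq s2 [] pre []
      rw [List.length_nil, pvConsFirst_nil _ (pvSplit_ne_nil s2)] at this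
      exact this
    have hparts : PySem.List.slice (PySem.Chars.splitOn s2 ['.']) none (some (-1))
        = (pvSplit s2).dropLast := by
      rw [pvSplitOn_eq, PySem.List.slice_to_neg_one]
    rw [hA, hparts, pvLoopB_run]
    by_cases hbadAll :
        ((pvSplit s2).dropLast).any (fun t => !(decide (1 < t.length ∧ t.length < 12))) = true
    · rw [if_pos hbadAll, if_pos hbadAll]
    · rw [if_neg hbadAll, if_neg hbadAll]
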